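-- pv_equiv track=rewrite | github.com/shvidkyu/fb-labs-2022 | cp_2/makovska_fb-01_vashchenok_fb-03_cp2/cp2.py | to_text_d
-- ===== SOURCE A (Python) =====
-- alfavit_d = 'абвгдеёэжзиыйклмнопрстуфхцчшщъьюя'
--
-- def dict_stv():
--     dict_d = {}
--     num = 0
--     for i in alfavit_d:
--         dict_d.update({i: num})
--         num += 1
--     return dict_d
--
-- def to_text_d(asciicd):
--     list_code = []
--     d = dict_stv()
--     for i in asciicd:
--         for value in d:
--             if i == d[value]:
--                 list_code.append(value)
--     return list_code
-- ===== SOURCE B (Python) =====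
-- alfavit_d = 'абвгдеёэжзиыйклмнопрстуфхцчшщъьюя'
--
-- def to_text_d(asciicd):
--     rev = list(alfavit_d)
--     out = []
--     for i in asciicd:
--         if 0 <= i < len(rev):
--             out.append(rev[i])
--     return out
-- ===== Notes on version B (the rewrite author's own statement) =====
-- stated objective: simpler
-- what changed: B drops the dict entirely: since the char->index dict is just enumerate(alfavit_d), B indexes the alphabet list directly with a range check, replacing A's per-code scan over all 33 dict entries with one O(1) lookup.
import Mathlib
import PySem

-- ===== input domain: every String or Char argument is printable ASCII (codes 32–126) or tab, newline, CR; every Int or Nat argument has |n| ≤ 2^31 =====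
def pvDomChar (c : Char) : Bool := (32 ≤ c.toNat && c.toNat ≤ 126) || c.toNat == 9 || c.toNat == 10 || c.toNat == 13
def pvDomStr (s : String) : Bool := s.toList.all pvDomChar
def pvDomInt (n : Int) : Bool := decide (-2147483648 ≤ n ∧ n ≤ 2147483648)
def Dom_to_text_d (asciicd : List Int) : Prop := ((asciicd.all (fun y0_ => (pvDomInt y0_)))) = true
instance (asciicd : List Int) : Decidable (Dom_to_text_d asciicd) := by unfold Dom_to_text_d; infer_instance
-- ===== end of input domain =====

-- B drops the dict: the char->index dict is just enumerate(alfavit_d), so B indexes the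
-- alphabet list directly with a range check instead of scanning all 33 dict entries per code (objective: simpler).

-- ===== PORT A =====
def alfavit_d : String := "абвгдеёэжзиыйклмнопрстуфхцчшщъьюя"

-- dict_stv(): builds {char: index} by iterating the alphabet with a running counter
def dict_stv : PySem.Dict String Int :=
  (alfavit_d.toList.foldl
    (fun (st : PySem.Dict String Int × Int) i => (st.1.insert (String.mk [i]) st.2, st.2 + 1))
    (PySem.Dict.empty, 0)).1

-- 'for value in d: if i == d[value]' — value is always a key of d, so d[value] never raises;
-- getD with default 0 is exact here.
def to_text_d (asciicd : List Int) : List String :=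
  let d := dict_stv
  asciicd.foldl
    (fun list_code i =>
      d.keys.foldl
        (fun acc value => if i = d.getD value 0 then acc ++ [value] else acc)
        list_code)
    []

-- ===== PORT B =====
-- rev = list(alfavit_d)
def alfavit_list : List String := alfavit_d.toList.map (fun c => String.mk [c])

-- guard 0 <= i < len(rev) ensures rev[i] is in range, so pyGet? returns some; getD "" is exact.
def to_text_d_alt (asciicd : List Int) : List String :=
  let rev := alfavit_list
  asciicd.foldl
    (fun out i =>
      if 0 ≤ i ∧ i < (rev.length : Int) then out ++ [(PySem.List.pyGet? rev i).getD ""] else out)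
    []

-- ===== PRECONDITION & SPEC =====
def Spec_to_text_d (asciicd : List Int) (out : List String) : Prop := out = to_text_d_alt asciicd
instance (asciicd : List Int) (out : List String) : Decidable (Spec_to_text_d asciicd out) := by unfold Spec_to_text_d; infer_instance

-- ===== CLAIM (what is proved, stated in full; the proofs are below) =====
def Claim_equal_to_text_d : Prop := ∀ (asciicd : List Int), Dom_to_text_d asciicd → Spec_to_text_d asciicd (to_text_d asciicd)

-- ===== LEMMAS AND PROOFS =====

lemma keys_bounds : ∀ v ∈ dict_stv.keys, 0 ≤ dict_stv.getD v 0 ∧ dict_stv.getD v 0 < 33 := by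
  decide

lemma filter_keys (i : Int) :
    dict_stv.keys.filter (fun v => decide (i = dict_stv.getD v 0))
      = if 0 ≤ i ∧ i < 33 then [(PySem.List.pyGet? alfavit_list i).getD ""] else [] := by
  by_cases h : 0 ≤ i ∧ i < 33
  · rw [if_pos h]
    obtain ⟨h1, h2⟩ := h
    interval_cases i <;> decide
  · rw [if_neg h]
    apply List.filter_eq_nil_iff.mpr
    intro v hv
    have hb := keys_bounds v hv
    simp only [decide_eq_true_eq]
    omega

lemma inner_eq (i : Int) (acc : List String) :
    dict_stv.keys.foldl
        (fun acc value => if i = dict_stv.getD value 0 then acc ++ [value] else acc) acc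
      = if 0 ≤ i ∧ i < (alfavit_list.length : Int) then
          acc ++ [(PySem.List.pyGet? alfavit_list i).getD ""] else acc := by
  rw [PySem.List.foldl_append_ite_eq_filter, filter_keys]
  have hlen : (alfavit_list.length : Int) = 33 := by decide
  rw [hlen]
  by_cases h : 0 ≤ i ∧ i < 33 <;> simp [h]

lemma fold_eq (l : List Int) (acc : List String) :
    l.foldl
        (fun list_code i =>
          dict_stv.keys.foldl
            (fun acc value => if i = dict_stv.getD value 0 then acc ++ [value] else acc)
            list_code) acc
      = l.foldl
          (fun out i =>
            if 0 ≤ i ∧ i < (alfavit_list.length : Int) then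
              out ++ [(PySem.List.pyGet? alfavit_list i).getD ""] else out) acc := by
  induction l generalizing acc with
  | nil => rfl
  | cons x xs ih => simp only [List.foldl_cons, inner_eq]

-- ===== VERDICT (by name: the statement is the Claim_ definition above) =====
theorem to_text_d_spec : Claim_equal_to_text_d := by
  intro asciicd _
  unfold Spec_to_text_d to_text_d to_text_d_alt
  exact fold_eq asciicd []
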